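-- pv_equiv track=rewrite | github.com/MichalDudekk/ASD | 64 - islands - wyspy.py | islands_dijkstra
-- ===== SOURCE A (Python) =====
-- from math import inf
-- from queue import PriorityQueue
--
-- def islands_dijkstra(G,s,t):
--     n = len(G)
--     d = [[inf for _ in range(3)] for i in range(n)]
--     visited = [[False for _ in range(3)] for i in range(n)]
--     # 0 - przybyl samolotem ; 1 - przybyl promem ; 2 - przybyl mostem
--     pq = PriorityQueue()
--
--     for i in range(3):
--         d[s][i] = 0
--         pq.put( (d[s][i],s,i) )
--
--     while not pq.empty():
--         _ , v , state = pq.get()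
--         if visited[v][state]:
--             continue
--         visited[v][state] = True
--         for u in range(n):
--             if G[v][u] == 0:
--                 continue
--             if G[v][u] == 8:
--                 new_state = 0
--             elif G[v][u] == 5:
--                 new_state = 1
--             else:
--                 new_state = 2
--
--             if state == new_state:
--                 continue
--             if d[u][new_state] > d[v][state] + G[v][u]:
--                 d[u][new_state] = d[v][state] + G[v][u]
--                 pq.put( (d[u][new_state],u,new_state) )
--
--     res = min(d[t][0],d[t][1],d[t][2])
--     return res if res != inf else None
-- ===== SOURCE B (Python) =====
-- # B: Dijkstra over (node, arrival-mode) states without a priority queue: the next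
-- # state to settle is found by a direct linear scan of the distance table (no heap,
-- # no duplicate/stale queue entries to skip), relaxations otherwise as in the task.
-- from math import inf
--
-- def islands_dijkstra(G, s, t):
--     n = len(G)
--     d = [[inf] * 3 for _ in range(n)]
--     done = [[False] * 3 for _ in range(n)]
--     for m in range(3):
--         d[s][m] = 0
--     while True:
--         best = None
--         for v in range(n):
--             for m in range(3):
--                 if not done[v][m] and d[v][m] != inf:
--                     if best is None or (d[v][m], v, m) < best:
--                         best = (d[v][m], v, m)
--         if best is None:
--             break
--         dv, v, m = best
--         done[v][m] = True
--         for u in range(n):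
--             w = G[v][u]
--             if w == 0:
--                 continue
--             nm = 0 if w == 8 else 1 if w == 5 else 2
--             if nm != m and dv + w < d[u][nm]:
--                 d[u][nm] = dv + w
--     r = min(d[t])
--     return None if r == inf else r
-- ===== Notes on version B (the rewrite author's own statement) =====
-- stated objective: alternative
-- what changed: B settles (node, arrival-mode) states by re-scanning the distance table for the lexicographically least unsettled finite state instead of maintaining A's PriorityQueue with duplicate stale entries and visited-skip pops, so the queue, the lazy deletions and the skip branch disappear.
-- outside the precondition, e.g. on islands_dijkstra([[0]], -1, 0): A returns 0, B returns 0; on islands_dijkstra([[0, 0], []], 0, 0): A returns 0, B returns 0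
import Mathlib
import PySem

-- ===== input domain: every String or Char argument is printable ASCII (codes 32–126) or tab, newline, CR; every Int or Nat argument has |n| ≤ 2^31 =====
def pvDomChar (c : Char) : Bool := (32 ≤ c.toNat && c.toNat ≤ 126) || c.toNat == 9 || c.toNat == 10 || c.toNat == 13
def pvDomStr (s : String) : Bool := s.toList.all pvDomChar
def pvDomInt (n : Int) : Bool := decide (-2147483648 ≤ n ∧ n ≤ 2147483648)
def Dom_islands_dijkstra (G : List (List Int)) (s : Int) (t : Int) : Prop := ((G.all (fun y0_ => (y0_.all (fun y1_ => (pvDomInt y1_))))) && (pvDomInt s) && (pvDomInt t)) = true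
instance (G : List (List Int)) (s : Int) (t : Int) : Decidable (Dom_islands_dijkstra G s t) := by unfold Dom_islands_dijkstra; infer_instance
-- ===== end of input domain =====

-- B replaces A's PriorityQueue (with duplicate stale entries and visited-skip pops) by a direct
-- linear scan of the distance table for the least unsettled finite state; same relaxation rule.


-- ===== PORT A =====
-- shared low-level helpers: 2-d list access/update (indices in range under Pre_), mode
-- classification, min of two optional distances (none = math.inf), and the Python
-- lexicographic order on (dist, node, mode) triples
def get2 {α : Type} (m : List (List α)) (i j : Nat) (dflt : α) : α := (m.getD i []).getD j dflt

def set2 {α : Type} (m : List (List α)) (i j : Nat) (a : α) : List (List α) :=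
  m.set i ((m.getD i []).set j a)

def modeOf (w : Int) : Nat := if w = 8 then 0 else if w = 5 then 1 else 2

def omin (a b : Option Int) : Option Int :=
  match a, b with
  | none, b => b
  | a, none => a
  | some x, some y => some (min x y)

def tlt (a b : Int × Nat × Nat) : Bool :=
  decide (a.1 < b.1 ∨ (a.1 = b.1 ∧ (a.2.1 < b.2.1 ∨ (a.2.1 = b.2.1 ∧ a.2.2 < b.2.2))))

-- pq.get(): the least entry of the (unsorted model of the) priority queue; ties are identical triples
def findMin (pq : List (Int × Nat × Nat)) : Option (Int × Nat × Nat) :=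
  pq.foldl (fun acc x =>
    match acc with
    | none => some x
    | some m => if tlt x m then some x else some m) none

-- one relaxation step of A's inner `for u in range(n)` loop (re-reads d[v][state] each time, as A does)
def stepA (G : List (List Int)) (v st : Nat)
    (acc : List (List (Option Int)) × List (Int × Nat × Nat)) (u : Nat) :
    List (List (Option Int)) × List (Int × Nat × Nat) :=
  let w := get2 G v u 0
  if w = 0 then acc else
  let ns := modeOf w
  if ns = st then acc else
  match get2 acc.1 v st none with
  | none => acc
  | some dv =>
    match get2 acc.1 u ns none with
    | none => (set2 acc.1 u ns (some (dv + w)), acc.2 ++ [(dv + w, u, ns)])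
    | some x =>
      if dv + w < x then (set2 acc.1 u ns (some (dv + w)), acc.2 ++ [(dv + w, u, ns)])
      else acc

def relaxA (G : List (List Int)) (n v st : Nat) (d0 : List (List (Option Int))) :
    List (List (Option Int)) × List (Int × Nat × Nat) :=
  (List.range n).foldl (stepA G v st) (d0, [])

-- number of unvisited cells: the part of loopA/loopB's termination measure
def cf (vis : List (List Bool)) : Nat := (vis.map (fun r => r.count false)).sum

-- (termination facts for the loops; cited in decreasing_by)
theorem findMin_mem_aux (l : List (Int × Nat × Nat)) :
    ∀ acc x, l.foldl (fun acc x =>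
      match acc with
      | none => some x
      | some m => if tlt x m then some x else some m) acc = some x →
      x ∈ l ∨ acc = some x := by
  induction l with
  | nil => intro acc x h; exact Or.inr h
  | cons y l ih =>
    intro acc x h
    rcases ih _ _ h with h' | h'
    · exact Or.inl (List.mem_cons_of_mem _ h')
    · match acc with
      | none => simp at h'; exact Or.inl (h' ▸ List.mem_cons_self)
      | some m =>
        by_cases ht : tlt y m
        · simp [ht] at h'; exact Or.inl (h' ▸ List.mem_cons_self)
        · simp [ht] at h'; exact Or.inr (by simp [h'])

theorem findMin_mem {pq : List (Int × Nat × Nat)} {x : Int × Nat × Nat}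
    (h : findMin pq = some x) : x ∈ pq := by
  rcases findMin_mem_aux pq none x h with h' | h'
  · exact h'
  · simp at h'

theorem length_erase_lt {pq : List (Int × Nat × Nat)} {x : Int × Nat × Nat}
    (h : x ∈ pq) : (pq.erase x).length < pq.length := by
  rw [List.length_erase_of_mem h]
  exact Nat.sub_lt (List.length_pos_of_mem h) (by omega)

theorem count_false_set_lt {r : List Bool} {j : Nat} (hj : j < r.length)
    (hf : r.getD j false = false) : (r.set j true).count false < r.count false := by
  induction r generalizing j with
  | nil => simp at hj
  | cons b r ih =>
    cases j with
    | zero => simp at hf; subst hf; simp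
    | succ j =>
      simp at hj hf
      have := ih hj hf
      simp only [List.set_cons_succ, List.count_cons]
      omega

theorem cf_set2_lt {vis : List (List Bool)} {i j : Nat}
    (hi : i < vis.length) (hj : j < (vis.getD i []).length)
    (hf : get2 vis i j false = false) : cf (set2 vis i j true) < cf vis := by
  induction vis generalizing i with
  | nil => simp at hi
  | cons r vis ih =>
    cases i with
    | zero =>
      simp [get2] at hj hf
      simp only [cf, set2, List.getD_cons_zero, List.set_cons_zero, List.map_cons, List.sum_cons]
      have := count_false_set_lt hj hf
      omega
    | succ i =>
      simp at hi
      simp only [get2, List.getD_cons_succ] at hj hf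
      have := ih hi hj hf
      simp only [cf, set2] at this ⊢
      simp only [List.getD_cons_succ, List.set_cons_succ, List.map_cons, List.sum_cons]
      omega

-- A's main `while not pq.empty()` loop; the `else` branch of the range check is a totality
-- guard only (under Pre_ every queue entry is in range)
def loopA (G : List (List Int)) (n : Nat) (d : List (List (Option Int)))
    (vis : List (List Bool)) (pq : List (Int × Nat × Nat)) : List (List (Option Int)) :=
  match hm : findMin pq with
  | none => d
  | some e =>
    if hvr : e.2.1 < vis.length ∧ e.2.2 < (vis.getD e.2.1 []).length then
      if get2 vis e.2.1 e.2.2 false then loopA G n d vis (pq.erase e)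
      else
        loopA G n (relaxA G n e.2.1 e.2.2 d).1 (set2 vis e.2.1 e.2.2 true)
          (pq.erase e ++ (relaxA G n e.2.1 e.2.2 d).2)
    else loopA G n d vis (pq.erase e)
termination_by (cf vis, pq.length)
decreasing_by
  · exact Prod.Lex.right _ (length_erase_lt (findMin_mem hm))
  · rename_i hnv
    exact Prod.Lex.left _ _ (cf_set2_lt hvr.1 hvr.2 (by simpa using hnv))
  · exact Prod.Lex.right _ (length_erase_lt (findMin_mem hm))

def islands_dijkstra (G : List (List Int)) (s : Int) (t : Int) : Option Int :=
  let n := G.length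
  let init := (List.range 3).foldl
    (fun (acc : List (List (Option Int)) × List (Int × Nat × Nat)) i =>
      (set2 acc.1 s.toNat i (some 0), acc.2 ++ [((0 : Int), s.toNat, i)]))
    (List.replicate n (List.replicate 3 (none : Option Int)), [])
  let df := loopA G n init.1 (List.replicate n (List.replicate 3 false)) init.2
  -- d[t]: Python list indexing with wraparound, exact for -n ≤ t < n (guaranteed by Pre_)
  let tN := (if t < 0 then t + (n : Int) else t).toNat
  omin (omin (get2 df tN 0 none) (get2 df tN 1 none)) (get2 df tN 2 none)

-- ===== PORT B =====
-- `best`: scan all (v, mode) cells in order, keep the lexicographically least unsettled finite one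
def pick (d : List (List (Option Int))) (vis : List (List Bool)) (n : Nat) :
    Option (Int × Nat × Nat) :=
  (List.range n).foldl (fun acc v =>
    (List.range 3).foldl (fun acc2 st =>
      if get2 vis v st false then acc2 else
      match get2 d v st none with
      | none => acc2
      | some x =>
        match acc2 with
        | none => some (x, v, st)
        | some b => if tlt (x, v, st) b then some (x, v, st) else acc2) acc) none

-- one relaxation step of B's inner loop (uses the settled distance dv, as Source B does)
def stepB (G : List (List Int)) (v st : Nat) (dv : Int)
    (d : List (List (Option Int))) (u : Nat) : List (List (Option Int)) :=
  let w := get2 G v u 0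
  if w = 0 then d else
  let ns := modeOf w
  if ns = st then d else
  match get2 d u ns none with
  | none => set2 d u ns (some (dv + w))
  | some x => if dv + w < x then set2 d u ns (some (dv + w)) else d

def relaxB (G : List (List Int)) (n v st : Nat) (dv : Int)
    (d0 : List (List (Option Int))) : List (List (Option Int)) :=
  (List.range n).foldl (stepB G v st dv) d0

-- B's `while True` loop; the range/unsettled check is a totality guard only
def loopB (G : List (List Int)) (n : Nat) (d : List (List (Option Int)))
    (vis : List (List Bool)) : List (List (Option Int)) :=
  match pick d vis n with
  | none => d
  | some e =>
    if hvr : e.2.1 < vis.length ∧ e.2.2 < (vis.getD e.2.1 []).length ∧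
        get2 vis e.2.1 e.2.2 false = false then
      loopB G n (relaxB G n e.2.1 e.2.2 e.1 d) (set2 vis e.2.1 e.2.2 true)
    else d
termination_by cf vis
decreasing_by
  exact cf_set2_lt hvr.1 hvr.2.1 hvr.2.2

def islands_dijkstra_alt (G : List (List Int)) (s : Int) (t : Int) : Option Int :=
  let n := G.length
  let d0 := (List.range 3).foldl (fun d m => set2 d s.toNat m (some 0))
    (List.replicate n (List.replicate 3 (none : Option Int)))
  let df := loopB G n d0 (List.replicate n (List.replicate 3 false))
  -- min(d[t]): Python list indexing with wraparound, exact for -n ≤ t < n (guaranteed by Pre_)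
  let tN := (if t < 0 then t + (n : Int) else t).toNat
  (df.getD tN []).foldl omin none

-- ===== PRECONDITION & SPEC =====
-- Pre_ restricts to well-formed instances: a non-empty matrix whose rows all have at least
-- n = len(G) entries, a real start index 0 ≤ s < n and a target index -n ≤ t < n (t is only
-- used to read the final row, so Python's negative-index wraparound is harmless and admitted).
-- Outside it A either raises IndexError (empty graph, out-of-range index, a reachable short
-- row) or returns only by accident of Python semantics (a short row that happens to be
-- unreachable; a negative s, whose raw value in A's priority-queue tuples makes the tie order
-- — and, with negative weights, the result — an artefact of the wraparound).
def Pre_islands_dijkstra (G : List (List Int)) (s : Int) (t : Int) : Prop :=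
  0 < G.length ∧ (∀ row ∈ G, G.length ≤ row.length) ∧
  0 ≤ s ∧ s < G.length ∧ -(G.length : Int) ≤ t ∧ t < G.length
instance (G : List (List Int)) (s : Int) (t : Int) : Decidable (Pre_islands_dijkstra G s t) := by
  unfold Pre_islands_dijkstra; infer_instance

def pvWitness_islands_dijkstra : List (List Int) × Int × Int := ([[0, 8], [5, 0]], 0, 1)

def Spec_islands_dijkstra (G : List (List Int)) (s : Int) (t : Int) (out : Option Int) : Prop := out = islands_dijkstra_alt G s t
instance (G : List (List Int)) (s : Int) (t : Int) (out : Option Int) : Decidable (Spec_islands_dijkstra G s t out) := by unfold Spec_islands_dijkstra; infer_instance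

-- ===== CLAIM (what is proved, stated in full; the proofs are below) =====
def Claim_equal_islands_dijkstra : Prop := ∀ (G : List (List Int)) (s : Int) (t : Int), Dom_islands_dijkstra G s t → Pre_islands_dijkstra G s t → Spec_islands_dijkstra G s t (islands_dijkstra G s t)

-- ===== LEMMAS AND PROOFS =====
-- ===== basic 2-d access lemmas =====
theorem length_set2 {α : Type} (m : List (List α)) (i j : Nat) (a : α) :
    (set2 m i j a).length = m.length := by simp [set2]

theorem getD_set2_self {α : Type} {m : List (List α)} {i : Nat} (j : Nat) (a : α)
    (hi : i < m.length) : (set2 m i j a).getD i [] = (m.getD i []).set j a := by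
  rw [set2, List.getD_eq_getElem?_getD, List.getElem?_set_self (by simpa using hi)]
  rfl

theorem getD_set2_ne {α : Type} {m : List (List α)} {i i' : Nat} (j : Nat) (a : α)
    (h : i ≠ i') : (set2 m i j a).getD i' [] = m.getD i' [] := by
  rw [set2, List.getD_eq_getElem?_getD, List.getElem?_set_ne h, ← List.getD_eq_getElem?_getD]

theorem get2_set2_self {α : Type} {m : List (List α)} {i j : Nat} (a dflt : α)
    (hi : i < m.length) (hj : j < (m.getD i []).length) :
    get2 (set2 m i j a) i j dflt = a := by
  rw [get2, getD_set2_self j a hi, List.getD_eq_getElem?_getD,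
    List.getElem?_set_self (by simpa using hj)]
  rfl

theorem get2_set2_ne {α : Type} {m : List (List α)} {i j i' j' : Nat} (a dflt : α)
    (h : i ≠ i' ∨ j ≠ j') : get2 (set2 m i j a) i' j' dflt = get2 m i' j' dflt := by
  rcases h with h | h
  · rw [get2, getD_set2_ne j a h, get2]
  · by_cases hi : i = i'
    · subst hi
      by_cases him : i < m.length
      · rw [get2, getD_set2_self j a him, List.getD_eq_getElem?_getD,
          List.getElem?_set_ne h, get2]
        simp [List.getD_eq_getElem?_getD]
      · have heq : set2 m i j a = m := by
          rw [set2, List.set_eq_of_length_le (Nat.le_of_not_lt him)]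
        rw [heq]
    · rw [get2, getD_set2_ne j a hi, get2]

-- ===== shape =====
def Shp {α : Type} (n : Nat) (m : List (List α)) : Prop :=
  m.length = n ∧ ∀ r ∈ m, r.length = 3

theorem shp_replicate {α : Type} (n : Nat) (x : α) :
    Shp n (List.replicate n (List.replicate 3 x)) := by
  constructor
  · simp
  · intro r hr
    rw [List.eq_of_mem_replicate hr]
    simp

theorem shp_row {α : Type} {n : Nat} {m : List (List α)} (h : Shp n m) {i : Nat}
    (hi : i < n) : (m.getD i []).length = 3 := by
  have hlen := h.1
  have hi' : i < m.length := by omega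
  rw [List.getD_eq_getElem?_getD, List.getElem?_eq_getElem hi']
  exact h.2 _ (List.getElem_mem hi')

theorem shp_set2 {α : Type} {n : Nat} {m : List (List α)} (h : Shp n m) (i j : Nat) (a : α) :
    Shp n (set2 m i j a) := by
  by_cases him : i < m.length
  · refine ⟨by simp [length_set2, h.1], ?_⟩
    intro r hr
    rcases List.mem_or_eq_of_mem_set hr with hr' | hr'
    · exact h.2 _ hr'
    · subst hr'
      rw [List.length_set]
      have hlen := h.1
      exact shp_row h (by omega)
  · have heq : set2 m i j a = m := by
      rw [set2, List.set_eq_of_length_le (Nat.le_of_not_lt him)]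
    rw [heq]
    exact h

theorem get2_replicate_none {n u m : Nat} :
    get2 (List.replicate n (List.replicate 3 (none : Option Int))) u m none = none := by
  simp only [get2, List.getD_eq_getElem?_getD]
  by_cases hu : u < n
  · rw [List.getElem?_replicate_of_lt hu]
    simp only [Option.getD_some]
    by_cases hm3 : m < 3
    · rw [List.getElem?_replicate_of_lt hm3]
      rfl
    · rw [List.getElem?_eq_none (by simpa using Nat.le_of_not_lt hm3)]
      rfl
  · have hnone : (List.replicate n (List.replicate 3 (none : Option Int)))[u]? = none :=
      List.getElem?_eq_none (by simpa using Nat.le_of_not_lt hu)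
    rw [hnone]
    simp
-- ===== order and queue-minimum lemmas =====
theorem tlt_cases (a b : Int × Nat × Nat) : a = b ∨ tlt a b = true ∨ tlt b a = true := by
  obtain ⟨a1, a2, a3⟩ := a
  obtain ⟨b1, b2, b3⟩ := b
  simp only [tlt, decide_eq_true_eq, Prod.mk.injEq]
  by_cases h1 : a1 = b1
  · by_cases h2 : a2 = b2
    · by_cases h3 : a3 = b3
      · exact Or.inl ⟨h1, h2, h3⟩
      · rcases Nat.lt_or_ge a3 b3 with h | h
        · exact Or.inr (Or.inl (by omega))
        · exact Or.inr (Or.inr (by omega))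
    · rcases Nat.lt_or_ge a2 b2 with h | h
      · exact Or.inr (Or.inl (by omega))
      · exact Or.inr (Or.inr (by omega))
  · rcases Int.lt_or_lt_of_ne h1 with h | h
    · exact Or.inr (Or.inl (by omega))
    · exact Or.inr (Or.inr (by omega))

theorem findMin_none {pq : List (Int × Nat × Nat)} (h : findMin pq = none) : pq = [] := by
  cases pq with
  | nil => rfl
  | cons y l =>
    exfalso
    rw [findMin, List.foldl_cons] at h
    -- after the first step the accumulator is `some y` and stays some
    have aux : ∀ (l : List (Int × Nat × Nat)) (a : Int × Nat × Nat),
        l.foldl (fun acc x =>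
          match acc with
          | none => some x
          | some m => if tlt x m then some x else some m) (some a) ≠ none := by
      intro l
      induction l with
      | nil => intro a h; simp at h
      | cons z l ih =>
        intro a h
        rw [List.foldl_cons] at h
        by_cases ht : tlt z a
        · exact ih _ (by simpa [ht] using h)
        · exact ih _ (by simpa [ht] using h)
    exact aux l y h

theorem findMin_min_aux (l : List (Int × Nat × Nat)) :
    ∀ acc r, l.foldl (fun acc x =>
      match acc with
      | none => some x
      | some m => if tlt x m then some x else some m) acc = some r →
      (∀ y ∈ l, tlt y r = false) ∧ (∀ a, acc = some a → tlt a r = false) := by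
  induction l with
  | nil =>
    intro acc r h
    simp only [List.foldl_nil] at h
    refine ⟨by simp, ?_⟩
    intro a ha
    rw [ha] at h
    injection h with h
    subst h
    obtain ⟨r1, r2, r3⟩ := a
    simp only [tlt, decide_eq_false_iff_not]
    omega
  | cons y l ih =>
    intro acc r h
    rw [List.foldl_cons] at h
    have hrec := ih _ r h
    cases acc with
    | none =>
      have hyr : tlt y r = false := hrec.2 y rfl
      refine ⟨?_, ?_⟩
      · intro z hz
        rcases List.mem_cons.mp hz with rfl | hz'
        · exact hyr
        · exact hrec.1 z hz'
      · intro a ha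
        simp at ha
    | some m =>
      by_cases ht : tlt y m
      · have hyr : tlt y r = false := hrec.2 y (by simp [ht])
        refine ⟨?_, ?_⟩
        · intro z hz
          rcases List.mem_cons.mp hz with rfl | hz'
          · exact hyr
          · exact hrec.1 z hz'
        · intro b hb
          have hbm : b = m := by injection hb with h'; exact h'.symm
          subst hbm
          obtain ⟨y1, y2, y3⟩ := y
          obtain ⟨m1, m2, m3⟩ := b
          obtain ⟨r1, r2, r3⟩ := r
          simp only [tlt, decide_eq_true_eq, decide_eq_false_iff_not] at ht hyr ⊢
          omega
      · have hmr : tlt m r = false := hrec.2 m (by simp [ht])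
        refine ⟨?_, ?_⟩
        · intro z hz
          rcases List.mem_cons.mp hz with rfl | hz'
          · obtain ⟨y1, y2, y3⟩ := z
            obtain ⟨m1, m2, m3⟩ := m
            obtain ⟨r1, r2, r3⟩ := r
            simp only [tlt, decide_eq_true_eq, decide_eq_false_iff_not] at ht hmr ⊢
            omega
          · exact hrec.1 z hz'
        · intro b hb
          have hbm : b = m := by injection hb with h'; exact h'.symm
          subst hbm
          exact hmr

theorem findMin_min {pq : List (Int × Nat × Nat)} {r : Int × Nat × Nat}
    (h : findMin pq = some r) : ∀ y ∈ pq, tlt y r = false :=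
  (findMin_min_aux pq none r h).1

theorem findMin_spec {L : List (Int × Nat × Nat)} {c : Int × Nat × Nat}
    (hc : c ∈ L) (hbest : ∀ c' ∈ L, c' = c ∨ tlt c c' = true) : findMin L = some c := by
  cases hm : findMin L with
  | none => rw [findMin_none hm] at hc; simp at hc
  | some r =>
    have hr := findMin_mem hm
    have h1 := findMin_min hm c hc
    rcases hbest r hr with rfl | h2
    · rfl
    · rcases tlt_cases c r with rfl | h | h
      · rfl
      · rw [h] at h1; cases h1
      · obtain ⟨c1, c2, c3⟩ := c
        obtain ⟨r1, r2, r3⟩ := r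
        simp only [tlt, decide_eq_true_eq] at h h2
        exfalso
        omega
-- ===== pick = findMin over the candidate list =====
def cands (d : List (List (Option Int))) (vis : List (List Bool)) (n : Nat) :
    List (Int × Nat × Nat) :=
  (List.range n).flatMap (fun v =>
    (List.range 3).filterMap (fun st =>
      if get2 vis v st false then none
      else (get2 d v st none).map (fun x => (x, v, st))))

theorem pick_eq_findMin (d : List (List (Option Int))) (vis : List (List Bool)) (n : Nat) :
    pick d vis n = findMin (cands d vis n) := by
  rw [pick, cands, findMin, List.foldl_flatMap]
  congr 1
  funext acc v
  rw [List.foldl_filterMap]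
  congr 1
  funext acc2 st
  by_cases hv : get2 vis v st false
  · simp [hv]
  · simp only [hv, if_false, Bool.false_eq_true]
    cases get2 d v st none with
    | none => simp
    | some x => cases acc2 <;> simp

theorem mem_cands {d : List (List (Option Int))} {vis : List (List Bool)} {n : Nat}
    {e : Int × Nat × Nat} :
    e ∈ cands d vis n ↔ e.2.1 < n ∧ e.2.2 < 3 ∧ get2 vis e.2.1 e.2.2 false = false ∧
      get2 d e.2.1 e.2.2 none = some e.1 := by
  obtain ⟨x, v, st⟩ := e
  simp only [cands, List.mem_flatMap, List.mem_filterMap, List.mem_range]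
  constructor
  · rintro ⟨v', hv', st', hst', h⟩
    by_cases hvis : get2 vis v' st' false
    · simp [hvis] at h
    · simp only [hvis, if_false, Bool.false_eq_true, Option.map_eq_some_iff] at h
      obtain ⟨y, hy, heq⟩ := h
      simp only [Prod.mk.injEq] at heq
      obtain ⟨rfl, rfl, rfl⟩ := heq
      exact ⟨hv', hst', by simpa using hvis, hy⟩
  · rintro ⟨hv, hst, hvis, hd⟩
    exact ⟨v, hv, st, hst, by simp [hvis, hd]⟩
-- ===== the relaxation loops of A and B compute the same table =====
theorem modeOf_lt3 (w : Int) : modeOf w < 3 := by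
  unfold modeOf; split_ifs <;> omega

theorem relax_main (G : List (List Int)) (n v st : Nat) (dv : Int) :
    ∀ (us : List Nat) (dA : List (List (Option Int))) (ps : List (Int × Nat × Nat)),
    us.Nodup → (∀ u ∈ us, u < n) → Shp n dA → v < n → st < 3 →
    get2 dA v st none = some dv →
    (∀ e ∈ ps, e.2.1 < n ∧ e.2.2 < 3 ∧ get2 dA e.2.1 e.2.2 none = some e.1 ∧ e.2.1 ∉ us) →
    (us.foldl (stepA G v st) (dA, ps)).1 = us.foldl (stepB G v st dv) dA ∧
    Shp n (us.foldl (stepA G v st) (dA, ps)).1 ∧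
    get2 (us.foldl (stepA G v st) (dA, ps)).1 v st none = some dv ∧
    (∀ u m x, get2 dA u m none = some x →
       ∃ x', get2 (us.foldl (stepA G v st) (dA, ps)).1 u m none = some x' ∧ x' ≤ x) ∧
    (∀ u m y, get2 (us.foldl (stepA G v st) (dA, ps)).1 u m none = some y →
       get2 dA u m none = some y ∨ (y, u, m) ∈ (us.foldl (stepA G v st) (dA, ps)).2) ∧
    (∀ e ∈ (us.foldl (stepA G v st) (dA, ps)).2,
       e.2.1 < n ∧ e.2.2 < 3 ∧ get2 (us.foldl (stepA G v st) (dA, ps)).1 e.2.1 e.2.2 none = some e.1) ∧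
    (∀ e ∈ ps, e ∈ (us.foldl (stepA G v st) (dA, ps)).2) := by
  intro us
  induction us with
  | nil =>
    intro dA ps _ _ hshp _ _ hdv hps
    refine ⟨rfl, hshp, hdv, ?_, ?_, ?_, ?_⟩
    · intro u m x hx; exact ⟨x, hx, le_refl _⟩
    · intro u m y hy; exact Or.inl hy
    · intro e he; exact ⟨(hps e he).1, (hps e he).2.1, (hps e he).2.2.1⟩
    · intro e he; exact he
  | cons u us ih =>
    intro dA ps hnd hbnd hshp hv3 hst3 hdv hps
    rw [List.foldl_cons, List.foldl_cons]
    have hu : u < n := hbnd u List.mem_cons_self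
    obtain ⟨hun, hnd'⟩ := List.nodup_cons.mp hnd
    have hbnd' : ∀ z ∈ us, z < n := fun z hz => hbnd z (List.mem_cons_of_mem _ hz)
    have hstep : (stepA G v st (dA, ps) u = (dA, ps) ∧ stepB G v st dv dA u = dA) ∨
        ((∀ x0, get2 dA u (modeOf (get2 G v u 0)) none = some x0 → dv + get2 G v u 0 < x0) ∧
         modeOf (get2 G v u 0) ≠ st ∧
         stepA G v st (dA, ps) u =
           (set2 dA u (modeOf (get2 G v u 0)) (some (dv + get2 G v u 0)),
            ps ++ [(dv + get2 G v u 0, u, modeOf (get2 G v u 0))]) ∧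
         stepB G v st dv dA u = set2 dA u (modeOf (get2 G v u 0)) (some (dv + get2 G v u 0))) := by
      by_cases hw0 : get2 G v u 0 = 0
      · exact Or.inl ⟨by simp [stepA, hw0], by simp [stepB, hw0]⟩
      · by_cases hns : modeOf (get2 G v u 0) = st
        · exact Or.inl ⟨by simp [stepA, hw0, hns], by simp [stepB, hw0, hns]⟩
        · cases hcur : get2 dA u (modeOf (get2 G v u 0)) none with
          | none =>
            refine Or.inr ⟨?_, hns, by simp [stepA, hw0, hns, hdv, hcur],
              by simp [stepB, hw0, hns, hcur]⟩
            intro x0 h0; simp at h0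
          | some x =>
            by_cases hlt : dv + get2 G v u 0 < x
            · refine Or.inr ⟨?_, hns, by simp [stepA, hw0, hns, hdv, hcur, hlt],
                by simp [stepB, hw0, hns, hcur, hlt]⟩
              intro x0 h0; injection h0 with h0; omega
            · exact Or.inl ⟨by simp [stepA, hw0, hns, hdv, hcur, hlt],
                by simp [stepB, hw0, hns, hcur, hlt]⟩
    rcases hstep with ⟨eA, eB⟩ | ⟨hless, hns, eA, eB⟩
    · rw [eA, eB]
      exact ih dA ps hnd' hbnd' hshp hv3 hst3 hdv
        (fun e he => ⟨(hps e he).1, (hps e he).2.1, (hps e he).2.2.1,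
          fun hmem => (hps e he).2.2.2 (List.mem_cons_of_mem _ hmem)⟩)
    · rw [eA, eB]
      have hns3 : modeOf (get2 G v u 0) < 3 := modeOf_lt3 _
      have hulen : u < dA.length := by have := hshp.1; omega
      have hrowlen : modeOf (get2 G v u 0) < (dA.getD u []).length := by
        rw [shp_row hshp hu]; exact hns3
      have hself : get2 (set2 dA u (modeOf (get2 G v u 0)) (some (dv + get2 G v u 0)))
          u (modeOf (get2 G v u 0)) none = some (dv + get2 G v u 0) :=
        get2_set2_self _ _ hulen hrowlen
      have hshp' := shp_set2 hshp u (modeOf (get2 G v u 0)) (some (dv + get2 G v u 0))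
      have hdv' : get2 (set2 dA u (modeOf (get2 G v u 0)) (some (dv + get2 G v u 0)))
          v st none = some dv := by
        rw [get2_set2_ne _ _ (Or.inr hns)]; exact hdv
      have hps' : ∀ e ∈ ps ++ [(dv + get2 G v u 0, u, modeOf (get2 G v u 0))],
          e.2.1 < n ∧ e.2.2 < 3 ∧
          get2 (set2 dA u (modeOf (get2 G v u 0)) (some (dv + get2 G v u 0)))
            e.2.1 e.2.2 none = some e.1 ∧ e.2.1 ∉ us := by
        intro e he
        rcases List.mem_append.mp he with he | he
        · have h := hps e he
          have hne : e.2.1 ≠ u := fun hh => h.2.2.2 (hh ▸ List.mem_cons_self)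
          refine ⟨h.1, h.2.1, ?_, fun hmem => h.2.2.2 (List.mem_cons_of_mem _ hmem)⟩
          rw [get2_set2_ne _ _ (Or.inl (Ne.symm hne))]
          exact h.2.2.1
        · simp only [List.mem_singleton] at he
          subst he
          exact ⟨hu, hns3, hself, hun⟩
      obtain ⟨ia, ib, idv, ic2, ic3, ic4, ic6⟩ :=
        ih (set2 dA u (modeOf (get2 G v u 0)) (some (dv + get2 G v u 0)))
          (ps ++ [(dv + get2 G v u 0, u, modeOf (get2 G v u 0))])
          hnd' hbnd' hshp' hv3 hst3 hdv' hps'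
      refine ⟨ia, ib, idv, ?_, ?_, ic4, ?_⟩
      · intro u' m' x hx
        by_cases hcell : u = u' ∧ modeOf (get2 G v u 0) = m'
        · obtain ⟨rfl, rfl⟩ := hcell
          have hc := hless x hx
          obtain ⟨x', hx', hle⟩ := ic2 u (modeOf (get2 G v u 0)) _ hself
          exact ⟨x', hx', le_trans hle (le_of_lt hc)⟩
        · have hmid : get2 (set2 dA u (modeOf (get2 G v u 0)) (some (dv + get2 G v u 0)))
              u' m' none = some x := by
            rw [get2_set2_ne _ _ (by tauto)]; exact hx
          exact ic2 u' m' x hmid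
      · intro u' m' y hy
        rcases ic3 u' m' y hy with hmid | hmem
        · by_cases hcell : u = u' ∧ modeOf (get2 G v u 0) = m'
          · obtain ⟨rfl, rfl⟩ := hcell
            rw [hself] at hmid
            injection hmid with hmid
            subst hmid
            exact Or.inr (ic6 _ (List.mem_append_right _ (List.mem_singleton_self _)))
          · rw [get2_set2_ne _ _ (by tauto)] at hmid
            exact Or.inl hmid
        · exact Or.inr hmem
      · intro e he
        exact ic6 e (List.mem_append_left _ he)
-- ===== unfolding lemmas for the two loops =====
theorem loopA_none {G : List (List Int)} {n : Nat} {d : List (List (Option Int))}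
    {vis : List (List Bool)} {pq : List (Int × Nat × Nat)}
    (hm : findMin pq = none) : loopA G n d vis pq = d := by
  rw [loopA]
  split
  · rfl
  · rename_i e' hm'
    rw [hm] at hm'
    cases hm'

theorem loopA_skip {G : List (List Int)} {n : Nat} {d : List (List (Option Int))}
    {vis : List (List Bool)} {pq : List (Int × Nat × Nat)} {e : Int × Nat × Nat}
    (hm : findMin pq = some e)
    (hvr : e.2.1 < vis.length ∧ e.2.2 < (vis.getD e.2.1 []).length)
    (hvis : get2 vis e.2.1 e.2.2 false = true) :
    loopA G n d vis pq = loopA G n d vis (pq.erase e) := by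
  rw [loopA]
  split
  · rename_i hm'
    rw [hm] at hm'
    cases hm'
  · rename_i e' hm'
    rw [hm] at hm'
    injection hm' with hm'
    subst hm'
    rw [dif_pos hvr, if_pos hvis]

theorem loopA_go {G : List (List Int)} {n : Nat} {d : List (List (Option Int))}
    {vis : List (List Bool)} {pq : List (Int × Nat × Nat)} {e : Int × Nat × Nat}
    (hm : findMin pq = some e)
    (hvr : e.2.1 < vis.length ∧ e.2.2 < (vis.getD e.2.1 []).length)
    (hvis : get2 vis e.2.1 e.2.2 false = false) :
    loopA G n d vis pq = loopA G n (relaxA G n e.2.1 e.2.2 d).1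
      (set2 vis e.2.1 e.2.2 true) (pq.erase e ++ (relaxA G n e.2.1 e.2.2 d).2) := by
  rw [loopA]
  split
  · rename_i hm'
    rw [hm] at hm'
    cases hm'
  · rename_i e' hm'
    rw [hm] at hm'
    injection hm' with hm'
    subst hm'
    rw [dif_pos hvr, if_neg (by simp [hvis])]

theorem loopB_none {G : List (List Int)} {n : Nat} {d : List (List (Option Int))}
    {vis : List (List Bool)} (hp : pick d vis n = none) : loopB G n d vis = d := by
  rw [loopB]
  split
  · rfl
  · rename_i e' hp'
    rw [hp] at hp'
    cases hp'

theorem loopB_go {G : List (List Int)} {n : Nat} {d : List (List (Option Int))}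
    {vis : List (List Bool)} {e : Int × Nat × Nat}
    (hp : pick d vis n = some e)
    (hvr : e.2.1 < vis.length ∧ e.2.2 < (vis.getD e.2.1 []).length ∧
      get2 vis e.2.1 e.2.2 false = false) :
    loopB G n d vis = loopB G n (relaxB G n e.2.1 e.2.2 e.1 d) (set2 vis e.2.1 e.2.2 true) := by
  rw [loopB]
  split
  · rename_i hp'
    rw [hp] at hp'
    cases hp'
  · rename_i e' hp'
    rw [hp] at hp'
    injection hp' with hp'
    subst hp'
    rw [dif_pos hvr]

-- ===== the loop invariant relating A's queue to the distance table =====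
def LoopInv (n : Nat) (d : List (List (Option Int))) (vis : List (List Bool))
    (pq : List (Int × Nat × Nat)) : Prop :=
  Shp n d ∧ Shp n vis ∧
  (∀ e ∈ pq, e.2.1 < n ∧ e.2.2 < 3 ∧ ∃ x, get2 d e.2.1 e.2.2 none = some x ∧ x ≤ e.1) ∧
  (∀ v st x, v < n → st < 3 → get2 vis v st false = false →
    get2 d v st none = some x → (x, v, st) ∈ pq)

theorem simLoop (G : List (List Int)) (n : Nat) :
    ∀ (d : List (List (Option Int))) (vis : List (List Bool)) (pq : List (Int × Nat × Nat)),
    LoopInv n d vis pq → loopA G n d vis pq = loopB G n d vis ∧ Shp n (loopA G n d vis pq) := by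
  intro d vis pq
  induction d, vis, pq using loopA.induct (G := G) (n := n) with
  | case1 d vis pq hm =>
    intro hinv
    obtain ⟨hsd, hsv, h2, h3⟩ := hinv
    have hcn : cands d vis n = [] := by
      rw [List.eq_nil_iff_forall_not_mem]
      intro e he
      obtain ⟨h1', h2', h3', h4'⟩ := mem_cands.mp he
      have := h3 e.2.1 e.2.2 e.1 h1' h2' h3' h4'
      rw [findMin_none hm] at this
      simp at this
    have hB : loopB G n d vis = d :=
      loopB_none (by rw [pick_eq_findMin, hcn]; rfl)
    rw [loopA_none hm, hB]
    exact ⟨rfl, hsd⟩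
  | case2 d vis pq e hm hvr hvis ih =>
    intro hinv
    obtain ⟨hsd, hsv, h2, h3⟩ := hinv
    have hinv' : LoopInv n d vis (pq.erase e) := by
      refine ⟨hsd, hsv, fun e' he' => h2 e' (List.mem_of_mem_erase he'), ?_⟩
      intro v0 st0 x0 hv0 hst0 hvis0 hd0
      have hmem := h3 v0 st0 x0 hv0 hst0 hvis0 hd0
      have hne : (x0, v0, st0) ≠ e := by
        intro hh
        rw [← hh] at hvis
        simp at hvis
        rw [hvis] at hvis0
        cases hvis0
      exact (List.mem_erase_of_ne hne).mpr hmem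
    have IH := ih hinv'
    rw [loopA_skip hm hvr hvis]
    exact IH
  | case4 d vis pq e hm hvr ih =>
    intro hinv
    obtain ⟨hsd, hsv, h2, h3⟩ := hinv
    obtain ⟨hb1, hb2, _⟩ := h2 e (findMin_mem hm)
    exact absurd ⟨by have := hsv.1; omega, by rw [shp_row hsv hb1]; omega⟩ hvr
  | case3 d vis pq e hm hvr hvis ih =>
    intro hinv
    obtain ⟨hsd, hsv, h2, h3⟩ := hinv
    obtain ⟨p, v0, st0⟩ := e
    simp only at hm hvr hvis ih ⊢
    obtain ⟨hv3, hst3, x, hx, hxle⟩ := h2 _ (findMin_mem hm)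
    simp only at hv3 hst3 hx hxle
    have hvisF : get2 vis v0 st0 false = false := by simpa using hvis
    have hmemx : (x, v0, st0) ∈ pq := h3 _ _ _ hv3 hst3 hvisF hx
    have hxp : x = p := by
      have hmin := findMin_min hm _ hmemx
      simp only [tlt, decide_eq_false_iff_not] at hmin
      omega
    rw [hxp] at hx hmemx
    -- B picks the same state
    have hpick : pick d vis n = some (p, v0, st0) := by
      rw [pick_eq_findMin]
      apply findMin_spec (mem_cands.mpr ⟨hv3, hst3, hvisF, hx⟩)
      intro c' hc'
      obtain ⟨hc1, hc2, hc3, hc4⟩ := mem_cands.mp hc'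
      have hcpq : (c'.1, c'.2.1, c'.2.2) ∈ pq := h3 _ _ _ hc1 hc2 hc3 hc4
      have hmin := findMin_min hm _ hcpq
      rcases tlt_cases (p, v0, st0) (c'.1, c'.2.1, c'.2.2) with heq | h | h
      · exact Or.inl (by rw [heq])
      · exact Or.inr h
      · rw [h] at hmin
        cases hmin
    -- the two relaxations agree
    obtain ⟨ra, rb, rdv, rc2, rc3, rc4, rc6⟩ :=
      relax_main G n v0 st0 p (List.range n) d [] List.nodup_range
        (fun z hz => List.mem_range.mp hz) hsd hv3 hst3 hx (by simp)
    have hra : relaxA G n v0 st0 d = (List.range n).foldl (stepA G v0 st0) (d, []) := rfl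
    have hrb : relaxB G n v0 st0 p d = (List.range n).foldl (stepB G v0 st0 p) d := rfl
    -- the new invariant
    have hvlen : v0 < vis.length := by have := hsv.1; omega
    have hrowlen : st0 < (vis.getD v0 []).length := by rw [shp_row hsv hv3]; omega
    have hinv' : LoopInv n (relaxA G n v0 st0 d).1 (set2 vis v0 st0 true)
        (pq.erase (p, v0, st0) ++ (relaxA G n v0 st0 d).2) := by
      refine ⟨by rw [hra]; exact rb, shp_set2 hsv _ _ _, ?_, ?_⟩
      · intro e' he'
        rcases List.mem_append.mp he' with he' | he'
        · obtain ⟨hb1, hb2, x', hx', hle⟩ := h2 e' (List.mem_of_mem_erase he')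
          obtain ⟨x'', hx'', hle''⟩ := rc2 _ _ _ hx'
          exact ⟨hb1, hb2, x'', by rw [hra]; exact hx'', by omega⟩
        · obtain ⟨hb1, hb2, heq⟩ := rc4 e' (by rw [hra] at he'; exact he')
          exact ⟨hb1, hb2, e'.1, by rw [hra]; exact heq, le_refl _⟩
      · intro u m y hu hm3 hvism hdm
        have hcell : ¬(u = v0 ∧ m = st0) := by
          rintro ⟨rfl, rfl⟩
          rw [get2_set2_self _ _ hvlen hrowlen] at hvism
          cases hvism
        rw [get2_set2_ne _ _ (by tauto)] at hvism
        rw [hra] at hdm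
        rcases rc3 u m y hdm with hold | hps
        · have hmem := h3 u m y hu hm3 hvism hold
          have hne2 : (y, u, m) ≠ (p, v0, st0) := by
            intro hh
            simp only [Prod.mk.injEq] at hh
            exact hcell ⟨hh.2.1, hh.2.2⟩
          exact List.mem_append_left _ ((List.mem_erase_of_ne hne2).mpr hmem)
        · exact List.mem_append_right _ (by rw [hra]; exact hps)
    have IH := ih hinv'
    have hgo := loopA_go (G := G) (n := n) (d := d) hm ⟨hvlen, hrowlen⟩ hvisF
    simp only at hgo
    rw [hgo]
    refine ⟨?_, IH.2⟩
    rw [IH.1, loopB_go hpick ⟨hvlen, hrowlen, hvisF⟩]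
    rw [show (relaxA G n v0 st0 d).1 = relaxB G n v0 st0 p d from by rw [hra, hrb]; exact ra]
-- ===== the initial state satisfies the invariant; the final answers coincide =====
theorem main_equiv (G : List (List Int)) (s t : Int) (hpre : Pre_islands_dijkstra G s t) :
    islands_dijkstra G s t = islands_dijkstra_alt G s t := by
  obtain ⟨hn, hrows, hs0, hsn, ht0, htn⟩ := hpre
  rw [islands_dijkstra, islands_dijkstra_alt]
  simp only [show List.range 3 = [0, 1, 2] from rfl, List.foldl_cons, List.foldl_nil,
    List.cons_append, List.nil_append]
  set n := G.length with hnn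
  set sN := s.toNat with hsN
  set tN := (if t < 0 then t + (n : Int) else t).toNat with htN
  have hs : sN < n := by omega
  have ht : tN < n := by rw [htN]; split_ifs <;> omega
  set d0 : List (List (Option Int)) := List.replicate n (List.replicate 3 none) with hd0
  set d1 := set2 d0 sN 0 (some 0) with hd1
  set d2 := set2 d1 sN 1 (some 0) with hd2
  set d3 := set2 d2 sN 2 (some 0) with hd3
  have shp0 : Shp n d0 := shp_replicate n none
  have shp1 : Shp n d1 := shp_set2 shp0 _ _ _
  have shp2 : Shp n d2 := shp_set2 shp1 _ _ _
  have shp3 : Shp n d3 := shp_set2 shp2 _ _ _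
  have hlen0 : sN < d0.length := by rw [shp0.1]; exact hs
  have hlen1 : sN < d1.length := by rw [shp1.1]; exact hs
  have hlen2 : sN < d2.length := by rw [shp2.1]; exact hs
  have hcell0 : get2 d3 sN 0 none = some 0 := by
    rw [hd3, get2_set2_ne _ _ (Or.inr (by omega)), hd2,
      get2_set2_ne _ _ (Or.inr (by omega)), hd1,
      get2_set2_self _ _ hlen0 (by rw [shp_row shp0 hs]; omega)]
  have hcell1 : get2 d3 sN 1 none = some 0 := by
    rw [hd3, get2_set2_ne _ _ (Or.inr (by omega)), hd2,
      get2_set2_self _ _ hlen1 (by rw [shp_row shp1 hs]; omega)]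
  have hcell2 : get2 d3 sN 2 none = some 0 := by
    rw [hd3, get2_set2_self _ _ hlen2 (by rw [shp_row shp2 hs]; omega)]
  have hinvert : ∀ u m y, get2 d3 u m none = some y → (y, u, m) ∈
      [((0 : Int), sN, 0), ((0 : Int), sN, 1), ((0 : Int), sN, 2)] := by
    intro u m y hy
    by_cases hc2 : u = sN ∧ m = 2
    · obtain ⟨rfl, rfl⟩ := hc2
      rw [hcell2] at hy
      injection hy with hy
      subst hy
      simp
    · rw [hd3, get2_set2_ne _ _ (by tauto)] at hy
      by_cases hc1 : u = sN ∧ m = 1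
      · obtain ⟨rfl, rfl⟩ := hc1
        rw [hd2, get2_set2_self _ _ hlen1 (by rw [shp_row shp1 hs]; omega)] at hy
        injection hy with hy
        subst hy
        simp
      · rw [hd2, get2_set2_ne _ _ (by tauto)] at hy
        by_cases hc0 : u = sN ∧ m = 0
        · obtain ⟨rfl, rfl⟩ := hc0
          rw [hd1, get2_set2_self _ _ hlen0 (by rw [shp_row shp0 hs]; omega)] at hy
          injection hy with hy
          subst hy
          simp
        · rw [hd1, get2_set2_ne _ _ (by tauto), hd0, get2_replicate_none] at hy
          cases hy
  have hinv : LoopInv n d3 (List.replicate n (List.replicate 3 false))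
      [((0 : Int), sN, 0), ((0 : Int), sN, 1), ((0 : Int), sN, 2)] := by
    refine ⟨shp3, shp_replicate n false, ?_, ?_⟩
    · intro e he
      simp only [List.mem_cons, List.not_mem_nil, or_false] at he
      rcases he with rfl | rfl | rfl
      · exact ⟨hs, by simp, 0, hcell0, le_refl _⟩
      · exact ⟨hs, by simp, 0, hcell1, le_refl _⟩
      · exact ⟨hs, by simp, 0, hcell2, le_refl _⟩
    · intro u m y _ _ _ hy
      exact hinvert u m y hy
  obtain ⟨heq, hshpf⟩ := simLoop G n d3 (List.replicate n (List.replicate 3 false))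
    [((0 : Int), sN, 0), ((0 : Int), sN, 1), ((0 : Int), sN, 2)] hinv
  rw [heq]
  set df := loopB G n d3 (List.replicate n (List.replicate 3 false)) with hdf
  rw [heq] at hshpf
  obtain ⟨a, b, c, hrow⟩ := List.length_eq_three.mp (shp_row hshpf ht)
  rw [show get2 df tN 0 none = a from by rw [get2, hrow]; rfl,
    show get2 df tN 1 none = b from by rw [get2, hrow]; rfl,
    show get2 df tN 2 none = c from by rw [get2, hrow]; rfl, hrow]
  rfl

-- ===== VERDICT (by name: the statement is the Claim_ definition above) =====
theorem islands_dijkstra_spec : Claim_equal_islands_dijkstra := by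
  intro G s t _ hpre
  unfold Spec_islands_dijkstra
  exact main_equiv G s t hpre
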